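-- pv_equiv track=rewrite | github.com/saiteja6969/Gitam-2019 | DataStructures.py | EvenSumdigits
-- ===== SOURCE A (Python) =====
-- def EvenSumdigits(str):
--     sum=0
--     str=list(str)
--     for i in range(len(str)):
--         if ord(str[i])>=48 and ord(str[i])<=57:
--
--             a=int(str[i])
--
--             if(a%2==0):
--                 sum=sum+a;
--
--     return sum;
-- ===== SOURCE B (Python) =====
-- def EvenSumdigits(str):
--     counts = {}
--     for ch in str:
--         counts[ch] = counts.get(ch, 0) + 1
--     return 2*counts.get('2', 0) + 4*counts.get('4', 0) + 6*counts.get('6', 0) + 8*counts.get('8', 0)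
-- ===== Notes on version B (the rewrite author's own statement) =====
-- stated objective: alternative
-- what changed: Replaces the per-character branch-and-accumulate scan with a single-pass character frequency dictionary, from which the result is computed in closed form as a weighted sum of the frequencies of the four nonzero even digit characters.
import Mathlib
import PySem

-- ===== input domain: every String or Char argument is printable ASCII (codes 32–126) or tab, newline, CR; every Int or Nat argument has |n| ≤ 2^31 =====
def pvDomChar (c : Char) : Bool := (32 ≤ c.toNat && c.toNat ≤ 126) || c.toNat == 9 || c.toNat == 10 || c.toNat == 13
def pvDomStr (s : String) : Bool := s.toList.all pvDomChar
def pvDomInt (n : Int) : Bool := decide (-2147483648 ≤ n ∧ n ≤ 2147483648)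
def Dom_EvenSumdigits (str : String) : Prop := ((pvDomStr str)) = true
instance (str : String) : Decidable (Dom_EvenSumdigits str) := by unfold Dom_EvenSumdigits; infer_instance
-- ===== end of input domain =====

-- B replaces A's per-character branch-and-accumulate scan by a one-pass character
-- frequency dictionary combined in closed form over the even digit characters (alternative decomposition).

-- ===== PORT A =====
def EvenSumdigits (str : String) : Int :=
  let l := str.toList
  (PySem.List.pyRange 0 (l.length : Int) 1).foldl
    (fun sum i =>
      let c := PySem.List.pyGetD l i ' '
      if 48 ≤ c.toNat ∧ c.toNat ≤ 57 then
        let a : Int := (c.toNat : Int) - 48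
        if a % 2 == 0 then sum + a else sum
      else sum) 0

-- ===== PORT B =====
def EvenSumdigits_alt (str : String) : Int :=
  let counts : PySem.Dict Char Int :=
    str.toList.foldl (fun d c => d.insert c (d.getD c 0 + 1)) PySem.Dict.empty
  2 * counts.getD '2' 0 + 4 * counts.getD '4' 0 + 6 * counts.getD '6' 0 + 8 * counts.getD '8' 0

-- ===== PRECONDITION & SPEC =====
def Spec_EvenSumdigits (str : String) (out : Int) : Prop := out = EvenSumdigits_alt str
instance (str : String) (out : Int) : Decidable (Spec_EvenSumdigits str out) := by unfold Spec_EvenSumdigits; infer_instance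

-- ===== CLAIM (what is proved, stated in full; the proofs are below) =====
def Claim_equal_EvenSumdigits : Prop := ∀ (str : String), Dom_EvenSumdigits str → Spec_EvenSumdigits str (EvenSumdigits str)

-- ===== LEMMAS AND PROOFS =====

-- the step value added by A for one character
def pvStepVal (c : Char) : Int :=
  if c = '2' then 2 else if c = '4' then 4 else if c = '6' then 6 else if c = '8' then 8 else 0

lemma pvCharEq {c d : Char} (h : c.toNat = d.toNat) : c = d := by
  have := congrArg Char.ofNat h
  simpa [Char.ofNat_toNat] using this

lemma pvStep_eq (sum : Int) (c : Char) :
    (if 48 ≤ c.toNat ∧ c.toNat ≤ 57 then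
        (if ((c.toNat : Int) - 48) % 2 == 0 then sum + ((c.toNat : Int) - 48) else sum)
      else sum) = sum + pvStepVal c := by
  by_cases h2 : c = '2'
  · subst h2
    have h : '2'.toNat = 50 := rfl
    simp [pvStepVal, h]
  by_cases h4 : c = '4'
  · subst h4
    have h : '4'.toNat = 52 := rfl
    simp [pvStepVal, h]
  by_cases h6 : c = '6'
  · subst h6
    have h : '6'.toNat = 54 := rfl
    simp [pvStepVal, h]
  by_cases h8 : c = '8'
  · subst h8
    have h : '8'.toNat = 56 := rfl
    simp [pvStepVal, h]
  have hv : pvStepVal c = 0 := by simp [pvStepVal, h2, h4, h6, h8]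
  rw [hv]
  split_ifs with hd he
  · have hn2 : c.toNat ≠ 50 := fun h => h2 (pvCharEq h)
    have hn4 : c.toNat ≠ 52 := fun h => h4 (pvCharEq h)
    have hn6 : c.toNat ≠ 54 := fun h => h6 (pvCharEq h)
    have hn8 : c.toNat ≠ 56 := fun h => h8 (pvCharEq h)
    have hdvd : (2:Int) ∣ ((c.toNat : Int) - 48) := by
      simpa using he
    have : c.toNat = 48 := by omega
    simp [this]
  · simp
  · simp

lemma pvSumVals (l : List Char) :
    (l.map pvStepVal).sum
      = 2 * (l.count '2' : Int) + 4 * (l.count '4' : Int)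
        + 6 * (l.count '6' : Int) + 8 * (l.count '8' : Int) := by
  induction l with
  | nil => simp
  | cons c t ih =>
    simp only [List.map_cons, List.sum_cons, ih, List.count_cons]
    by_cases h2 : c = '2' <;> by_cases h4 : c = '4' <;> by_cases h6 : c = '6' <;>
      by_cases h8 : c = '8' <;> simp_all [pvStepVal] <;> ring

lemma pvFoldAdd (l : List Char) (init : Int) :
    l.foldl (fun sum c => sum + pvStepVal c) init = init + (l.map pvStepVal).sum := by
  induction l generalizing init with
  | nil => simp
  | cons c t ih => simp [ih]; ring

lemma pvFoldA (l : List Char) (init : Int) :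
    l.foldl (fun sum c =>
      if 48 ≤ c.toNat ∧ c.toNat ≤ 57 then
        (if ((c.toNat : Int) - 48) % 2 == 0 then sum + ((c.toNat : Int) - 48) else sum)
      else sum) init
    = init + 2 * (l.count '2' : Int) + 4 * (l.count '4' : Int)
        + 6 * (l.count '6' : Int) + 8 * (l.count '8' : Int) := by
  have h : (fun (sum : Int) (c : Char) =>
      if 48 ≤ c.toNat ∧ c.toNat ≤ 57 then
        (if ((c.toNat : Int) - 48) % 2 == 0 then sum + ((c.toNat : Int) - 48) else sum)
      else sum) = fun sum c => sum + pvStepVal c := by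
    funext sum c; exact pvStep_eq sum c
  rw [h, pvFoldAdd, pvSumVals]; ring

-- ===== VERDICT (by name: the statement is the Claim_ definition above) =====
theorem EvenSumdigits_spec : Claim_equal_EvenSumdigits := by
  intro s _
  show EvenSumdigits s = EvenSumdigits_alt s
  unfold EvenSumdigits EvenSumdigits_alt
  rw [PySem.List.foldl_pyRange_zero_pyGetD' s.toList ' '
      (fun sum c =>
        if 48 ≤ c.toNat ∧ c.toNat ≤ 57 then
          (if ((c.toNat : Int) - 48) % 2 == 0 then sum + ((c.toNat : Int) - 48) else sum)
        else sum) 0]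
  rw [pvFoldA]
  simp [PySem.Dict.getD_foldl_insert_add_one]
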